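-- pv_equiv track=rewrite | github.com/kbabuadze/GTP-traffic-analyzer | logger.py | convert_imsi_hex
-- ===== SOURCE A (Python) =====
-- def convert_imsi_hex(imsi):
-- 	element = 2
-- 	readable_imsi = ""
-- 	while element < len(imsi)-1:
-- 		readable_imsi +=imsi[element+1]
-- 		readable_imsi +=imsi[element]
-- 		element +=2
-- 	return readable_imsi[:15]
-- ===== SOURCE B (Python) =====
-- def convert_imsi_hex(imsi):
--     odds = imsi[3::2]
--     evens = imsi[2::2]
--     return ''.join(o + e for o, e in zip(odds, evens))[:15]
-- ===== Notes on version B (the rewrite author's own statement) =====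
-- stated objective: faster
-- what changed: Replaces the index-stepping while-loop that appends swapped characters one pair at a time (quadratic repeated string concatenation) with two strided slices interleaved by zip and joined once, then truncated to 15.
import Mathlib
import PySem

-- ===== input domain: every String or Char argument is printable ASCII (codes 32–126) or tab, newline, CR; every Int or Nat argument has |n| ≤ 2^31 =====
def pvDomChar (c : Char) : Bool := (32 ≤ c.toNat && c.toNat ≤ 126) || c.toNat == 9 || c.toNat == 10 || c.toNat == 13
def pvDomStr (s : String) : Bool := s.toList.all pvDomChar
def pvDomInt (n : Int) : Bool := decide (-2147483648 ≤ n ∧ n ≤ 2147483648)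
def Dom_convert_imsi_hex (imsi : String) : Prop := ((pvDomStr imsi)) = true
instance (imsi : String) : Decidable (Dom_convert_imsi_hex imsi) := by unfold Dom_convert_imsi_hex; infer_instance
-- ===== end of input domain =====

-- B replaces A's index-stepping while-loop with strided slices interleaved by zip (idiomatic rewrite).

-- ===== PORT A =====
-- the while-loop: element steps by 2, appending imsi[element+1] then imsi[element]
def convertLoopA (l : List Char) (element : Nat) (acc : List Char) : List Char :=
  if element < l.length - 1 then
    convertLoopA l (element + 2) (acc ++ [l[element + 1]!, l[element]!])
  else acc
termination_by l.length - element
decreasing_by omega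

def convert_imsi_hex (imsi : String) : String :=
  String.ofList (PySem.List.slice (convertLoopA imsi.toList 2 []) none (some 15))

-- ===== PORT B =====
-- stride2 xs = xs[::2]: every second element starting at the first.
-- Exact for Python's positive-step slice xs[a::2] as stride2 (xs.drop a).
def stride2 : List Char → List Char
  | [] => []
  | [a] => [a]
  | a :: _ :: rest => a :: stride2 rest

def convert_imsi_hex_alt (imsi : String) : String :=
  let odds := stride2 (imsi.toList.drop 3)      -- imsi[3::2]
  let evens := stride2 (imsi.toList.drop 2)     -- imsi[2::2]
  String.ofList (PySem.List.slice ((odds.zip evens).flatMap (fun oe => [oe.1, oe.2])) none (some 15))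

-- ===== PRECONDITION & SPEC =====
def Spec_convert_imsi_hex (imsi : String) (out : String) : Prop := out = convert_imsi_hex_alt imsi
instance (imsi : String) (out : String) : Decidable (Spec_convert_imsi_hex imsi out) := by unfold Spec_convert_imsi_hex; infer_instance

-- ===== CLAIM (what is proved, stated in full; the proofs are below) =====
def Claim_equal_convert_imsi_hex : Prop := ∀ (imsi : String), Dom_convert_imsi_hex imsi → Spec_convert_imsi_hex imsi (convert_imsi_hex imsi)

-- ===== LEMMAS AND PROOFS =====

-- canonical pair-swap of a list, used to characterise both ports
def pairSwap : List Char → List Char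
  | a :: b :: rest => b :: a :: pairSwap rest
  | _ => []

theorem convertLoopA_eq (l : List Char) (e : Nat) (acc : List Char) :
    convertLoopA l e acc = acc ++ pairSwap (l.drop e) := by
  induction e, acc using convertLoopA.induct l with
  | case1 e acc h ih =>
      rw [convertLoopA, if_pos h, ih]
      have he1 : e < l.length := by omega
      have he2 : e + 1 < l.length := by omega
      have hd : l.drop e = l[e] :: l[e + 1] :: l.drop (e + 2) := by
        rw [List.drop_eq_getElem_cons he1, List.drop_eq_getElem_cons he2]
      rw [hd]
      simp [pairSwap, List.getElem!_eq_getElem?_getD, List.getElem?_eq_getElem he1,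
        List.getElem?_eq_getElem he2]
  | case2 e acc h =>
      rw [convertLoopA, if_neg h]
      have : pairSwap (l.drop e) = [] := by
        have hlen : (l.drop e).length ≤ 1 := by simp; omega
        match hm : l.drop e with
        | [] => rfl
        | [a] => rfl
        | a :: b :: rest => rw [hm] at hlen; simp at hlen
      rw [this, List.append_nil]

theorem pairSwap_eq_zip (m : List Char) :
    pairSwap m = ((stride2 m.tail).zip (stride2 m)).flatMap (fun oe => [oe.1, oe.2]) := by
  induction m using pairSwap.induct with
  | case1 a b rest ih =>
      simp only [pairSwap, List.tail_cons, stride2]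
      match rest with
      | [] => simp [stride2, pairSwap]
      | c :: rest' =>
          simp only [stride2]
          rw [List.zip_cons_cons, List.flatMap_cons]
          simp only [List.tail_cons] at ih
          rw [ih]
          simp
  | case2 m h =>
      rcases m with _ | ⟨a, _ | ⟨b, rest⟩⟩
      · rfl
      · rfl
      · exact absurd rfl (h a b rest)

-- ===== VERDICT (by name: the statement is the Claim_ definition above) =====
theorem convert_imsi_hex_spec : Claim_equal_convert_imsi_hex := by
  intro imsi _
  unfold Spec_convert_imsi_hex convert_imsi_hex convert_imsi_hex_alt
  rw [convertLoopA_eq, pairSwap_eq_zip]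
  simp
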